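-- pv_equiv track=rewrite | github.com/RadosavljevicMilena/VestackaInteligencija | Laboratorijska vezba 3/Zadatak_13.py | edges_to_remove_cycles
-- ===== SOURCE A (Python) =====
-- def edges_to_remove_cycles(graph):
--     visited = set()
--     edges_to_remove = set()
--
--     def dfs(node, parent):
--         visited.add(node)
--         for neighbor in graph[node]:
--             #nemoj da gledas svog roditelja, gledaj samo svoju decu
--             if neighbor == parent:
--                 continue
--             #vec smo ga obisli, pravio bi se ciklus pa znamo da moze da se ukloni
--             if neighbor in visited:
--                 edges_to_remove.add(tuple(sorted((node, neighbor))))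
--             else:
--                 dfs(neighbor, node)
--
--     for node in graph:
--         if node not in visited:
--             dfs(node, None)
--
--     return edges_to_remove
-- ===== SOURCE B (Python) =====
-- def edges_to_remove_cycles(graph):
--     visited = set()
--     edges_to_remove = set()
--     for start in graph:
--         if start in visited:
--             continue
--         visited.add(start)
--         stack = [(start, None, iter(graph[start]))]
--         while stack:
--             node, parent, it = stack[-1]
--             for neighbor in it:
--                 if neighbor == parent:
--                     continue
--                 if neighbor in visited:
--                     lo, hi = (node, neighbor) if node <= neighbor else (neighbor, node)
--                     edges_to_remove.add((lo, hi))
--                 else: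
--                     visited.add(neighbor)
--                     stack.append((neighbor, node, iter(graph[neighbor])))
--                     break
--             else:
--                 stack.pop()
--     return edges_to_remove
-- ===== Notes on version B (the rewrite author's own statement) =====
-- stated objective: alternative
-- what changed: The recursive DFS helper is replaced by an explicit iterative DFS over a stack of (node, parent, neighbor-iterator) frames that marks nodes visited on descent, eliminating the recursion (and Python's recursion-depth limit on long paths).
import Mathlib
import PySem

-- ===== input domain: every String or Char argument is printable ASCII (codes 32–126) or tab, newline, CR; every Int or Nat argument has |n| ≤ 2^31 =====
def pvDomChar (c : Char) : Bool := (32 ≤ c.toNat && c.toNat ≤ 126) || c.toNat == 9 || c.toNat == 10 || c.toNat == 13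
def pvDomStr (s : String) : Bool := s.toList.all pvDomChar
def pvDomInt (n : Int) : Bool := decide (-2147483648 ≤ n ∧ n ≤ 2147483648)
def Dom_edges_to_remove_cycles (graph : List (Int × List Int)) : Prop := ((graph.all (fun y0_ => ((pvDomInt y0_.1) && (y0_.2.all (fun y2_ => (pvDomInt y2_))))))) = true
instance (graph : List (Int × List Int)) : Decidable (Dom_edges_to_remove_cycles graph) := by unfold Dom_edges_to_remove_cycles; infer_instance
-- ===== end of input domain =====

-- B replaces the recursive DFS by an explicit iterative DFS with a stack of (node, parent, remaining-neighbors)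
-- frames, marking nodes visited on descent; same return value (the set of cycle-closing edges).

-- tuple(sorted((a, b))) for two ints
def pvSortPair (a b : Int) : Int × Int := if a ≤ b then (a, b) else (b, a)

-- ===== PORT A =====
-- state: (visited, edges_to_remove)
mutual
-- the recursive dfs(node, parent); fuel is a totality guard only (decremented per nesting level)
def pvDfsA (g : PySem.Dict Int (List Int)) : Nat → Int → Option Int → (PySem.Set Int × PySem.Set (Int × Int)) → (PySem.Set Int × PySem.Set (Int × Int))
  | 0, _, _, st => st
  | f + 1, node, parent, st =>
      pvLoopA g f node parent (g.getD node []) (PySem.Set.add st.1 node, st.2)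
  termination_by f _ _ _ => (f, 0)
-- the 'for neighbor in graph[node]' loop inside dfs
def pvLoopA (g : PySem.Dict Int (List Int)) : Nat → Int → Option Int → List Int → (PySem.Set Int × PySem.Set (Int × Int)) → (PySem.Set Int × PySem.Set (Int × Int))
  | _, _, _, [], st => st
  | f, node, parent, n :: ns, st =>
      if some n = parent then pvLoopA g f node parent ns st
      else if PySem.Set.contains st.1 n then
        pvLoopA g f node parent ns (st.1, PySem.Set.add st.2 (pvSortPair node n))
      else
        pvLoopA g f node parent ns (pvDfsA g f n (some node) st)
  termination_by f _ _ rest _ => (f, rest.length + 1)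
end

def edges_to_remove_cycles (graph : List (Int × List Int)) : List (Int × Int) :=
  let g := PySem.Dict.ofList graph
  (g.keys.foldl
    (fun st node => if PySem.Set.contains st.1 node then st else pvDfsA g (g.keys.length + 1) node none st)
    (PySem.Set.empty, PySem.Set.empty)).2

-- ===== PORT B =====
-- the inner 'for neighbor in it' loop of one while-iteration: consume neighbors until a descent (break) or exhaustion
def pvScanB (node : Int) (parent : Option Int) : List Int → (PySem.Set Int × PySem.Set (Int × Int)) → ((PySem.Set Int × PySem.Set (Int × Int)) × Option (Int × List Int))
  | [], st => (st, none)
  | n :: ns, st =>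
      if some n = parent then pvScanB node parent ns st
      else if PySem.Set.contains st.1 n then
        pvScanB node parent ns (st.1, PySem.Set.add st.2 (if node ≤ n then (node, n) else (n, node)))
      else ((PySem.Set.add st.1 n, st.2), some (n, ns))

-- the 'while stack' loop; fuel is a totality guard, consumed only on a push (descent)
def pvRunB (g : PySem.Dict Int (List Int)) : Nat → List (Int × Option Int × List Int) → (PySem.Set Int × PySem.Set (Int × Int)) → (PySem.Set Int × PySem.Set (Int × Int))
  | _, [], st => st
  | 0, _ :: _, st => st
  | f + 1, (node, parent, rest) :: stk, st =>
      match pvScanB node parent rest st with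
      | (st', none) => pvRunB g (f + 1) stk st'
      | (st', some (n, rest')) => pvRunB g f ((n, some node, g.getD n []) :: (node, parent, rest') :: stk) st'
termination_by f stk _ => (f, stk.length)

def edges_to_remove_cycles_alt (graph : List (Int × List Int)) : List (Int × Int) :=
  let g := PySem.Dict.ofList graph
  (g.keys.foldl
    (fun st start =>
      if PySem.Set.contains st.1 start then st
      else pvRunB g (g.keys.length + 1) [(start, none, g.getD start [])] (PySem.Set.add st.1 start, st.2))
    (PySem.Set.empty, PySem.Set.empty)).2

-- ===== PRECONDITION & SPEC =====
-- Pre_ excludes exactly the inputs on which A raises KeyError: a neighbor in an (effective) adjacency list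
-- that is not a key of the dict (every adjacency list is fully scanned, so any such neighbor is reached).
def Pre_edges_to_remove_cycles (graph : List (Int × List Int)) : Prop :=
  ∀ p ∈ (PySem.Dict.ofList graph).items, ∀ n ∈ p.2, n ∈ (PySem.Dict.ofList graph).keys
instance (graph : List (Int × List Int)) : Decidable (Pre_edges_to_remove_cycles graph) := by unfold Pre_edges_to_remove_cycles; infer_instance

def pvWitness_edges_to_remove_cycles : (List (Int × List Int)) := [(0, [1, 2]), (1, [0, 2]), (2, [0, 1])]

def Spec_edges_to_remove_cycles (graph : List (Int × List Int)) (out : List (Int × Int)) : Prop := out = edges_to_remove_cycles_alt graph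
instance (graph : List (Int × List Int)) (out : List (Int × Int)) : Decidable (Spec_edges_to_remove_cycles graph out) := by unfold Spec_edges_to_remove_cycles; infer_instance

-- ===== CLAIM (what is proved, stated in full; the proofs are below) =====
def Claim_equal_edges_to_remove_cycles : Prop := ∀ (graph : List (Int × List Int)), Dom_edges_to_remove_cycles graph → Pre_edges_to_remove_cycles graph → Spec_edges_to_remove_cycles graph (edges_to_remove_cycles graph)

-- ===== LEMMAS AND PROOFS =====

-- number of still-unvisited keys among l
def pvUnvisL (vis : PySem.Set Int) (l : List Int) : Nat :=
  (l.filter (fun k => !(decide (k ∈ vis)))).length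

theorem pvUnvisL_le_length (vis : PySem.Set Int) (l : List Int) : pvUnvisL vis l ≤ l.length := by
  simpa [pvUnvisL] using List.length_filter_le _ l

theorem pvUnvisL_anti (v1 v2 : PySem.Set Int) (l : List Int) (h : ∀ x, x ∈ v1 → x ∈ v2) :
    pvUnvisL v2 l ≤ pvUnvisL v1 l := by
  induction l with
  | nil => simp [pvUnvisL]
  | cons a t ih =>
    simp only [pvUnvisL, List.filter_cons] at ih ⊢
    by_cases h1 : a ∈ v1
    · have h2 : a ∈ v2 := h a h1
      simp [h1, h2]; omega
    · by_cases h2 : a ∈ v2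
      · simp [h1, h2]; omega
      · simp [h1, h2]; omega

theorem pvUnvisL_add (vis : PySem.Set Int) (l : List Int) (n : Int) (hn : n ∈ l)
    (hnv : n ∉ vis) (hnd : l.Nodup) :
    pvUnvisL vis l = pvUnvisL (PySem.Set.add vis n) l + 1 := by
  have key : ∀ t : List Int, n ∉ t →
      List.filter (fun k => !decide (k ∈ PySem.Set.add vis n)) t
        = List.filter (fun k => !decide (k ∈ vis)) t := by
    intro t ht
    apply List.filter_congr
    intro x hx
    have hxn : x ≠ n := fun h => ht (h ▸ hx)
    simp [PySem.Set.mem_add, hxn]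
  obtain ⟨l1, l2, rfl⟩ := List.append_of_mem hn
  have hsplit := List.nodup_append.mp hnd
  have hn1 : n ∉ l1 := fun hm => hsplit.2.2 n hm n List.mem_cons_self rfl
  have hn2 : n ∉ l2 := (List.nodup_cons.mp hsplit.2.1).1
  have h1 : (!decide (n ∈ vis)) = true := by simp [hnv]
  have h2 : (!decide (n ∈ PySem.Set.add vis n)) = false := by simp [PySem.Set.mem_add]
  have e1 : List.filter (fun k => !decide (k ∈ vis)) (n :: l2)
      = n :: List.filter (fun k => !decide (k ∈ vis)) l2 := by
    rw [List.filter_cons, h1]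
    rfl
  have e2 : List.filter (fun k => !decide (k ∈ PySem.Set.add vis n)) (n :: l2)
      = List.filter (fun k => !decide (k ∈ PySem.Set.add vis n)) l2 := by
    rw [List.filter_cons, h2]
    rfl
  rw [pvUnvisL, pvUnvisL, List.filter_append, List.filter_append, e1, e2, key l1 hn1, key l2 hn2]
  simp only [List.length_append, List.length_cons]
  omega

-- visited only grows through dfs / the neighbor loop
theorem pvVisMono (g : PySem.Dict Int (List Int)) : ∀ f : Nat,
    (∀ node parent st x, x ∈ st.1 → x ∈ (pvDfsA g f node parent st).1) ∧
    (∀ rest node parent st x, x ∈ st.1 → x ∈ (pvLoopA g f node parent rest st).1) := by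
  intro f
  induction f using Nat.strong_induction_on with
  | _ f ihf =>
    have hdfs : ∀ node parent st x, x ∈ st.1 → x ∈ (pvDfsA g f node parent st).1 := by
      intro node parent st x hx
      cases f with
      | zero => simpa [pvDfsA] using hx
      | succ f' =>
        have hloop' := (ihf f' (Nat.lt_succ_self _)).2
        simp only [pvDfsA]
        exact hloop' _ _ _ (PySem.Set.add st.1 node, st.2) x
          (by simp [PySem.Set.mem_add]; exact Or.inl hx)
    have hloop : ∀ rest node parent st x, x ∈ st.1 → x ∈ (pvLoopA g f node parent rest st).1 := by
      intro rest
      induction rest with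
      | nil => intro node parent st x hx; simpa [pvLoopA] using hx
      | cons n ns ih =>
        intro node parent st x hx
        simp only [pvLoopA]
        split_ifs with h1 h2
        · exact ih node parent st x hx
        · exact ih node parent _ x hx
        · exact ih node parent _ x (hdfs n (some node) st x hx)
    exact ⟨hdfs, hloop⟩

theorem pvRunB_nil (g : PySem.Dict Int (List Int)) (f : Nat)
    (st : PySem.Set Int × PySem.Set (Int × Int)) : pvRunB g f [] st = st := by
  cases f <;> simp [pvRunB]

theorem pvAdjKeys (g : PySem.Dict Int (List Int))
    (hPre : ∀ p ∈ g.items, ∀ n ∈ p.2, n ∈ g.keys) (n : Int) :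
    ∀ m ∈ g.getD n [], m ∈ g.keys := by
  intro m hm
  cases h : g.get? n with
  | none => rw [PySem.Dict.getD_of_get?_eq_none g [] h] at hm; cases hm
  | some v =>
    rw [PySem.Dict.getD_of_get?_eq_some g [] h] at hm
    exact hPre _ (PySem.Dict.mem_items_of_get?_eq_some g h) m hm

-- main simulation: running one frame of B's machine computes A's neighbor loop, then continues with the rest of the stack
theorem pvSim (g : PySem.Dict Int (List Int))
    (hPre : ∀ p ∈ g.items, ∀ n ∈ p.2, n ∈ g.keys) (hnd : g.keys.Nodup) :
    ∀ k fA : Nat, ∀ node : Int, ∀ parent : Option Int, ∀ rest : List Int,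
    ∀ fB : Nat, ∀ st : PySem.Set Int × PySem.Set (Int × Int),
    ∀ stk : List (Int × Option Int × List Int),
    (∀ n ∈ rest, n ∈ g.keys) → pvUnvisL st.1 g.keys = k → k ≤ fA → k < fB →
    pvRunB g fB ((node, parent, rest) :: stk) st =
      pvRunB g (fB - (k - pvUnvisL (pvLoopA g fA node parent rest st).1 g.keys)) stk
        (pvLoopA g fA node parent rest st) := by
  intro k
  induction k using Nat.strong_induction_on with
  | _ k ihk =>
  intro fA node parent rest
  induction rest with
  | nil =>
    intro fB st stk _ hk _ hfB
    subst hk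
    simp only [pvLoopA, Nat.sub_self, Nat.sub_zero]
    cases fB with
    | zero => exact absurd hfB (Nat.not_lt_zero _)
    | succ f => simp [pvRunB, pvScanB]
  | cons n ns ihr =>
    intro fB st stk hrest hk hfA hfB
    by_cases hpar : some n = parent
    · have hLA : pvLoopA g fA node parent (n :: ns) st = pvLoopA g fA node parent ns st := by
        simp [pvLoopA, hpar]
      have hLB : pvRunB g fB ((node, parent, n :: ns) :: stk) st
          = pvRunB g fB ((node, parent, ns) :: stk) st := by
        cases fB with
        | zero => exact absurd hfB (Nat.not_lt_zero _)
        | succ f => simp only [pvRunB, pvScanB, if_pos hpar]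
      rw [hLB, hLA]
      exact ihr fB st stk (fun m hm => hrest m (List.mem_cons_of_mem _ hm)) hk hfA hfB
    · by_cases hvis : PySem.Set.contains st.1 n = true
      · have hmem : n ∈ st.1 := (PySem.Set.contains_iff st.1 n).mp hvis
        have hLA : pvLoopA g fA node parent (n :: ns) st
            = pvLoopA g fA node parent ns (st.1, PySem.Set.add st.2 (if node ≤ n then (node, n) else (n, node))) := by
          simp [pvLoopA, hpar, hmem, pvSortPair]
        have hLB : pvRunB g fB ((node, parent, n :: ns) :: stk) st
            = pvRunB g fB ((node, parent, ns) :: stk) (st.1, PySem.Set.add st.2 (if node ≤ n then (node, n) else (n, node))) := by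
          cases fB with
          | zero => exact absurd hfB (Nat.not_lt_zero _)
          | succ f => simp only [pvRunB, pvScanB, if_neg hpar, if_pos hvis]
        rw [hLB, hLA]
        exact ihr fB (st.1, PySem.Set.add st.2 (if node ≤ n then (node, n) else (n, node))) stk
          (fun m hm => hrest m (List.mem_cons_of_mem _ hm)) hk hfA hfB
      · have hnk : n ∈ g.keys := hrest n List.mem_cons_self
        have hnv : n ∉ st.1 := fun hm => hvis ((PySem.Set.contains_iff st.1 n).mpr hm)
        have hk1 : pvUnvisL st.1 g.keys = pvUnvisL (PySem.Set.add st.1 n) g.keys + 1 :=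
          pvUnvisL_add st.1 g.keys n hnk hnv hnd
        have hkk : k = pvUnvisL (PySem.Set.add st.1 n) g.keys + 1 := by omega
        obtain ⟨fA', rfl⟩ : ∃ fA', fA = fA' + 1 := ⟨fA - 1, by omega⟩
        obtain ⟨fB', rfl⟩ : ∃ fB', fB = fB' + 1 := ⟨fB - 1, by omega⟩
        have hadj : ∀ m ∈ g.getD n [], m ∈ g.keys := pvAdjKeys g hPre n
        have hstep : pvRunB g (fB' + 1) ((node, parent, n :: ns) :: stk) st
            = pvRunB g fB' ((n, some node, g.getD n []) :: (node, parent, ns) :: stk)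
                (PySem.Set.add st.1 n, st.2) := by
          simp only [pvRunB, pvScanB, if_neg hpar, if_neg hvis]
        have h1 := ihk (pvUnvisL (PySem.Set.add st.1 n) g.keys) (by omega) fA' n (some node)
          (g.getD n []) fB' (PySem.Set.add st.1 n, st.2) ((node, parent, ns) :: stk)
          hadj rfl (by omega) (by omega)
        have hmono1 : ∀ x, x ∈ (PySem.Set.add st.1 n) →
            x ∈ (pvLoopA g fA' n (some node) (g.getD n []) (PySem.Set.add st.1 n, st.2)).1 :=
          fun x hx => (pvVisMono g fA').2 _ _ _ _ x hx
        have hk2le : pvUnvisL (pvLoopA g fA' n (some node) (g.getD n []) (PySem.Set.add st.1 n, st.2)).1 g.keys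
            ≤ pvUnvisL (PySem.Set.add st.1 n) g.keys := pvUnvisL_anti _ _ _ hmono1
        have h2 := ihk (pvUnvisL (pvLoopA g fA' n (some node) (g.getD n []) (PySem.Set.add st.1 n, st.2)).1 g.keys)
          (by omega) (fA' + 1) node parent ns
          (fB' - (pvUnvisL (PySem.Set.add st.1 n) g.keys
                  - pvUnvisL (pvLoopA g fA' n (some node) (g.getD n []) (PySem.Set.add st.1 n, st.2)).1 g.keys))
          (pvLoopA g fA' n (some node) (g.getD n []) (PySem.Set.add st.1 n, st.2)) stk
          (fun m hm => hrest m (List.mem_cons_of_mem _ hm)) rfl (by omega) (by omega)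
        have hmono2 : ∀ x, x ∈ (pvLoopA g fA' n (some node) (g.getD n []) (PySem.Set.add st.1 n, st.2)).1 →
            x ∈ (pvLoopA g (fA' + 1) node parent ns (pvLoopA g fA' n (some node) (g.getD n []) (PySem.Set.add st.1 n, st.2))).1 :=
          fun x hx => (pvVisMono g (fA' + 1)).2 _ _ _ _ x hx
        have hk3le : pvUnvisL (pvLoopA g (fA' + 1) node parent ns (pvLoopA g fA' n (some node) (g.getD n []) (PySem.Set.add st.1 n, st.2))).1 g.keys
            ≤ pvUnvisL (pvLoopA g fA' n (some node) (g.getD n []) (PySem.Set.add st.1 n, st.2)).1 g.keys :=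
          pvUnvisL_anti _ _ _ hmono2
        have hRHS : pvLoopA g (fA' + 1) node parent (n :: ns) st
            = pvLoopA g (fA' + 1) node parent ns (pvLoopA g fA' n (some node) (g.getD n []) (PySem.Set.add st.1 n, st.2)) := by
          simp [pvLoopA, hpar, hnv, pvDfsA]
        rw [hstep, h1, h2, hRHS]
        congr 1
        omega

-- ===== VERDICT (by name: the statement is the Claim_ definition above) =====
theorem edges_to_remove_cycles_spec : Claim_equal_edges_to_remove_cycles := by
  intro graph _ hPre
  have hnd : (PySem.Dict.ofList graph : PySem.Dict Int (List Int)).keys.Nodup :=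
    PySem.Dict.nodup_keys_ofList _
  have hPre' : ∀ p ∈ (PySem.Dict.ofList graph : PySem.Dict Int (List Int)).items,
      ∀ n ∈ p.2, n ∈ (PySem.Dict.ofList graph : PySem.Dict Int (List Int)).keys := hPre
  have hstep : ∀ (st : PySem.Set Int × PySem.Set (Int × Int)) (node : Int),
      (if PySem.Set.contains st.1 node = true then st
       else pvDfsA (PySem.Dict.ofList graph) ((PySem.Dict.ofList graph : PySem.Dict Int (List Int)).keys.length + 1) node none st)
    = (if PySem.Set.contains st.1 node = true then st
       else pvRunB (PySem.Dict.ofList graph) ((PySem.Dict.ofList graph : PySem.Dict Int (List Int)).keys.length + 1)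
              [(node, none, (PySem.Dict.ofList graph : PySem.Dict Int (List Int)).getD node [])]
              (PySem.Set.add st.1 node, st.2)) := by
    intro st node
    by_cases hc : PySem.Set.contains st.1 node = true
    · rw [if_pos hc, if_pos hc]
    · rw [if_neg hc, if_neg hc]
      have hsim := pvSim (PySem.Dict.ofList graph) hPre' hnd
        (pvUnvisL (PySem.Set.add st.1 node) (PySem.Dict.ofList graph : PySem.Dict Int (List Int)).keys)
        (PySem.Dict.ofList graph : PySem.Dict Int (List Int)).keys.length node none
        ((PySem.Dict.ofList graph : PySem.Dict Int (List Int)).getD node [])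
        ((PySem.Dict.ofList graph : PySem.Dict Int (List Int)).keys.length + 1)
        (PySem.Set.add st.1 node, st.2) []
        (pvAdjKeys _ hPre' node) rfl (pvUnvisL_le_length _ _)
        (Nat.lt_succ_of_le (pvUnvisL_le_length _ _))
      rw [hsim, pvRunB_nil]
      simp [pvDfsA]
  show edges_to_remove_cycles graph = edges_to_remove_cycles_alt graph
  simp only [edges_to_remove_cycles, edges_to_remove_cycles_alt]
  congr 1
  congr 1
  funext st node
  exact hstep st node
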